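-- pv_equiv track=rewrite | github.com/pypi-data/pypi-mirror-395 | packages/separate/separate-1.1.0.tar.gz/separate-1.1.0/separate/functions/SEPARATE_FUNCTIONS.py | rename_repeating_dates
-- ===== SOURCE A (Python) =====
-- from collections import defaultdict
--
-- def rename_repeating_dates(dates):
--     """
--     Takes a list of dates and returns a new list with repeated dates suffixed with a counter (e.g. '2022-01-01_2')
--
--     Args:
--         dates (list): A list of dates.
--
--     Returns:
--         list: A list of renamed dates.
--     """
--     # Create a default dict to count occurrences of each date
--     date_counts = defaultdict(int)
--     renamed_dates = []  # Initialize an empty list to store the renamed dates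
--
--     # Iterate over the dates and count occurrences
--     for date in dates:
--         date_counts[date] += 1  # Increment the count for the current date
--         count = date_counts[date]  # Get the current count
--         if count > 1:  # If the date is repeating
--             # Append the date with the count to the renamed dates list
--             renamed_dates.append(f"{date}_{count}")
--         else:  # If the date is not repeating
--             # Append the date as is to the renamed dates list
--             renamed_dates.append(str(date))
--
--     return renamed_dates  # Return the list of renamed dates
-- ===== SOURCE B (Python) =====
-- def rename_repeating_dates(dates):
--     """
--     Takes a list of dates and returns a new list with repeated dates suffixed with a counter (e.g. '2022-01-01_2')
--
--     Two-phase re-implementation: first group the positions of each date value,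
--     then scatter the names (first occurrence plain, later ones suffixed with
--     their rank) into an output list by index.
--     """
--     positions = {}
--     for i, d in enumerate(dates):
--         positions.setdefault(d, []).append(i)
--     out = [""] * len(dates)
--     for d, idxs in positions.items():
--         for rank, i in enumerate(idxs, 1):
--             out[i] = str(d) if rank == 1 else f"{d}_{rank}"
--     return out
-- ===== Notes on version B (the rewrite author's own statement) =====
-- stated objective: alternative
-- what changed: Replaced A's single pass with a running defaultdict counter and an appended accumulator by a two-phase group-and-scatter: first build a dict mapping each value to its ordered positions, then fill a preallocated output list by index with the plain name at rank 1 and the rank-suffixed name otherwise.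
import Mathlib
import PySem

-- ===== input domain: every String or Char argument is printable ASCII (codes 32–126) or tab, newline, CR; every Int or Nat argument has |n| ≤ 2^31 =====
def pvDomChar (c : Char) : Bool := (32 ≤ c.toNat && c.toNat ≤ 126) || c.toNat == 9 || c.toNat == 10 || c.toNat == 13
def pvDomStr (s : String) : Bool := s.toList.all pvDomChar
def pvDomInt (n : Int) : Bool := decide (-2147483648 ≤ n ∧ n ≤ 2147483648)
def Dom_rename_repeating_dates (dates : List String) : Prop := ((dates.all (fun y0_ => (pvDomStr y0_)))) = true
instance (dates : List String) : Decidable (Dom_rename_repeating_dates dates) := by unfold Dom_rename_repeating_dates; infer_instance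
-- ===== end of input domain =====

-- B replaces A's single stateful counting pass by a two-phase group-and-scatter: group each value's positions, then write the names into a preallocated output by index (alternative decomposition).


-- ===== PORT A =====
def rename_repeating_dates (dates : List String) : List String :=
  (dates.foldl (fun (st : PySem.Dict String Int × List String) date =>
      let dc := st.1.insert date (st.1.getD date 0 + 1)
      let count := dc.getD date 0
      if count > 1 then (dc, st.2 ++ [date ++ "_" ++ PySem.Int.toStr count])
      else (dc, st.2 ++ [date])) (PySem.Dict.empty, [])).2

-- ===== PORT B =====
def rename_repeating_dates_alt (dates : List String) : List String :=
  -- phase 1: positions[d] = list of indices where d occurs (setdefault+append = modify with default [])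
  let positions := (PySem.List.enumerate dates 0).foldl
    (fun (pd : PySem.Dict String (List Int)) p => pd.modify p.2 [] (fun l => l ++ [p.1]))
    PySem.Dict.empty
  let out := List.replicate dates.length ""
  -- phase 2: scatter the names; `out[i] = …` with i drawn from enumerate(dates), so 0 ≤ i < len(out)
  -- and `List.set i.toNat` is exact here (Python would raise only for i out of range, which cannot occur)
  positions.items.foldl (fun out kv =>
    (PySem.List.enumerate kv.2 1).foldl (fun out ri =>
      out.set ri.2.toNat (if ri.1 == 1 then kv.1 else kv.1 ++ "_" ++ PySem.Int.toStr ri.1)) out) out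

-- ===== PRECONDITION & SPEC =====
def Spec_rename_repeating_dates (dates : List String) (out : List String) : Prop := out = rename_repeating_dates_alt dates
instance (dates : List String) (out : List String) : Decidable (Spec_rename_repeating_dates dates out) := by unfold Spec_rename_repeating_dates; infer_instance

-- ===== CLAIM (what is proved, stated in full; the proofs are below) =====
def Claim_equal_rename_repeating_dates : Prop := ∀ (dates : List String), Dom_rename_repeating_dates dates → Spec_rename_repeating_dates dates (rename_repeating_dates dates)

-- ===== LEMMAS AND PROOFS =====

/-- The intended name of a value `d` whose occurrence count in the prefix up to and
including it is `k` (`k ≥ 1` whenever it arises). -/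
def pvRender (d : String) (k : Nat) : String :=
  if k == 1 then d else d ++ "_" ++ PySem.Int.toStr (k : Int)

/-- Reference recursion: processed prefix `p`, remaining list `l`. -/
def pvSpecList (p l : List String) : List String :=
  match l with
  | [] => []
  | d :: l' => pvRender d ((p ++ [d]).count d) :: pvSpecList (p ++ [d]) l'

lemma pvStepA (p : List String) (d : String) :
    (PySem.Dict.counter p).insert d ((PySem.Dict.counter p).getD d 0 + 1)
      = PySem.Dict.counter (p ++ [d]) := by
  have h := PySem.Dict.foldl_insert_getD_add_one_eq_counter (p ++ [d])
  rw [List.foldl_append] at h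
  rw [PySem.Dict.foldl_insert_getD_add_one_eq_counter] at h
  simpa using h

lemma pvCountSelf (p : List String) (d : String) : 1 ≤ (p ++ [d]).count d :=
  List.count_pos_iff.mpr (by simp)

/-- A's loop body, named so the fold lemma can rewrite its applications
(definitionally equal to the lambda in the port). -/
def pvStepFun (st : PySem.Dict String Int × List String) (date : String) :
    PySem.Dict String Int × List String :=
  let dc := st.1.insert date (st.1.getD date 0 + 1)
  let count := dc.getD date 0
  if count > 1 then (dc, st.2 ++ [date ++ "_" ++ PySem.Int.toStr count])
  else (dc, st.2 ++ [date])

lemma pvStepFun_counter (p acc : List String) (d : String) :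
    pvStepFun (PySem.Dict.counter p, acc) d
      = (PySem.Dict.counter (p ++ [d]), acc ++ [pvRender d ((p ++ [d]).count d)]) := by
  show (if ((PySem.Dict.counter p).insert d ((PySem.Dict.counter p).getD d 0 + 1)).getD d 0 > 1
    then (((PySem.Dict.counter p).insert d ((PySem.Dict.counter p).getD d 0 + 1)),
      acc ++ [d ++ "_" ++ PySem.Int.toStr (((PySem.Dict.counter p).insert d ((PySem.Dict.counter p).getD d 0 + 1)).getD d 0)])
    else (((PySem.Dict.counter p).insert d ((PySem.Dict.counter p).getD d 0 + 1)), acc ++ [d]))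
    = (PySem.Dict.counter (p ++ [d]), acc ++ [pvRender d ((p ++ [d]).count d)])
  rw [pvStepA, PySem.Dict.getD_counter]
  by_cases h : (p ++ [d]).count d = 1
  · rw [h]
    norm_num [pvRender]
  · have h2 : 1 < (p ++ [d]).count d := by
      have := pvCountSelf p d; omega
    have h2' : (1 : Int) < ((p ++ [d]).count d : Int) := by exact_mod_cast h2
    rw [if_pos h2', pvRender, if_neg (by simpa using h)]

lemma pvA_fold (l : List String) : ∀ (p acc : List String),
    (l.foldl pvStepFun (PySem.Dict.counter p, acc)).2 = acc ++ pvSpecList p l := by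
  induction l with
  | nil => intro p acc; simp [pvSpecList]
  | cons d l ih =>
    intro p acc
    rw [List.foldl_cons, pvStepFun_counter,
      ih (p ++ [d]) (acc ++ [pvRender d ((p ++ [d]).count d)]), pvSpecList]
    simp

-- ---------- B side ----------

/-- `str(d) if rank == 1 else f"{d}_{rank}"` with an Int rank. -/
def pvName (k : String) (r : Int) : String :=
  if r == 1 then k else k ++ "_" ++ PySem.Int.toStr r

lemma pvName_cast (k : String) (c : Nat) : pvName k (c : Int) = pvRender k c := by
  by_cases h : c = 1
  · simp [pvName, pvRender, h]
  · have h' : ((c : Nat) : Int) ≠ 1 := by exact_mod_cast h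
    simp [pvName, pvRender, h, h']

/-- the ordered list of indices at which `k` occurs in `l`. -/
def pvOcc (l : List String) (k : String) : List Int :=
  ((PySem.List.enumerate l 0).filter (fun p => p.2 == k)).map (·.1)

/-- the (position, name) writes B performs, grouped by value. -/
def pvWrites (dates : List String) : List (Nat × String) :=
  (PySem.Set.ofList dates).flatMap (fun k =>
    (PySem.List.enumerate (pvOcc dates k) 1).map (fun ri => (ri.2.toNat, pvName k ri.1)))

/-- B's second phase as a flat fold of single-cell writes. -/
def pvScatter (ws : List (Nat × String)) (out : List String) : List String :=
  ws.foldl (fun o w => o.set w.1 w.2) out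

lemma pvScatter_length (ws : List (Nat × String)) : ∀ out,
    (pvScatter ws out).length = out.length := by
  induction ws with
  | nil => intro out; rfl
  | cons w ws ih => intro out; simp [pvScatter] at ih ⊢; rw [ih]; simp

lemma pvScatter_getElem?_of_not_mem (ws : List (Nat × String)) : ∀ (out : List String) (j : Nat),
    j ∉ ws.map (·.1) → (pvScatter ws out)[j]? = out[j]? := by
  induction ws with
  | nil => intro out j _; rfl
  | cons w ws ih =>
    intro out j hj
    simp only [List.map_cons, List.mem_cons, not_or] at hj
    show (pvScatter ws (out.set w.1 w.2))[j]? = out[j]?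
    rw [ih _ _ hj.2, List.getElem?_set_ne (fun h => hj.1 h.symm)]

lemma pvScatter_getElem?_of_mem (ws : List (Nat × String)) : ∀ (out : List String) (j : Nat) (v : String),
    (ws.map (·.1)).Nodup → (j, v) ∈ ws → j < out.length →
    (pvScatter ws out)[j]? = some v := by
  induction ws with
  | nil => intro out j v _ h _; simp at h
  | cons w ws ih =>
    intro out j v hnd hmem hj
    simp only [List.map_cons, List.nodup_cons] at hnd
    rcases List.mem_cons.mp hmem with h | h
    · subst h
      show (pvScatter ws (out.set j v))[j]? = some v
      rw [pvScatter_getElem?_of_not_mem ws _ _ hnd.1, List.getElem?_set_self hj]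
    · exact ih (out.set w.1 w.2) j v hnd.2 h (by simpa using hj)

lemma pvOcc_append_singleton (l : List String) (d k : String) :
    pvOcc (l ++ [d]) k = pvOcc l k ++ (if d == k then [(l.length : Int)] else []) := by
  unfold pvOcc
  rw [PySem.List.enumerate_append, List.filter_append, List.map_append]
  congr 1
  by_cases h : d == k
  · simp [PySem.List.enumerate_cons, PySem.List.enumerate_nil, h]
  · simp [PySem.List.enumerate_cons, PySem.List.enumerate_nil, h]

lemma pvOcc_length (l : List String) (k : String) :
    (pvOcc l k).length = l.count k := by
  induction l using List.reverseRecOn with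
  | nil => rfl
  | append_singleton l d ih =>
    rw [pvOcc_append_singleton, List.count_append]
    by_cases h : d == k
    · simp at h
      simp [h, ih]
    · simp at h
      simp [h, ih]

lemma pvOcc_mem (l : List String) (k : String) (i : Int) (hi : i ∈ pvOcc l k) :
    ∃ m : Nat, m < l.length ∧ i = (m : Int) ∧ l[m]? = some k := by
  unfold pvOcc at hi
  rcases List.mem_map.mp hi with ⟨p, hp, hpi⟩
  rcases List.mem_filter.mp hp with ⟨hpe, hpk⟩
  rcases (PySem.List.mem_enumerate_iff l 0 p).mp hpe with ⟨m, hm, rfl⟩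
  refine ⟨m, hm, ?_, ?_⟩
  · simpa using hpi.symm
  · simp at hpk
    simp [List.getElem?_eq_getElem hm, hpk]

lemma pvOcc_getElem? (l : List String) : ∀ (k : String) (j : Nat), l[j]? = some k →
    (pvOcc l k)[((l.take (j+1)).count k) - 1]? = some (j : Int) := by
  induction l using List.reverseRecOn with
  | nil => intro k j h; simp at h
  | append_singleton l d ih =>
    intro k j h
    rcases Nat.lt_or_ge j l.length with hj | hj
    · have hjl : l[j]? = some k := by
        rw [List.getElem?_append_left hj] at h; exact h
      have htake : (l ++ [d]).take (j+1) = l.take (j+1) := by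
        rw [List.take_append]
        have : j + 1 - l.length = 0 := by omega
        simp [this]
      rw [htake, pvOcc_append_singleton]
      have hlt : ((l.take (j+1)).count k) - 1 < (pvOcc l k).length := by
        have := ih k j hjl
        exact (List.getElem?_eq_some_iff.mp this).1
      rw [List.getElem?_append_left hlt]
      exact ih k j hjl
    · have hje : j = l.length := by
        have := (List.getElem?_eq_some_iff.mp h).1
        simp at this; omega
      subst hje
      have hd : d = k := by
        rw [List.getElem?_append_right (le_refl _)] at h
        simpa using h
      subst hd
      have htake : (l ++ [d]).take (l.length + 1) = l ++ [d] := by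
        rw [List.take_append]; simp
      rw [htake, pvOcc_append_singleton]
      simp only [beq_self_eq_true, if_pos]
      rw [List.count_append]
      have hlen : l.count d + [d].count d - 1 = (pvOcc l d).length := by
        rw [pvOcc_length]; simp
      rw [hlen, List.getElem?_append_right (le_refl _)]
      simp

lemma pvOcc_pairwise (l : List String) (k : String) :
    (pvOcc l k).Pairwise (· < ·) := by
  unfold pvOcc
  refine List.Pairwise.map _ (fun a b h => h) ?_
  exact List.Pairwise.filter _ (PySem.List.pairwise_lt_enumerate l 0)

lemma pvOcc_toNat_nodup (l : List String) (k : String) :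
    ((pvOcc l k).map Int.toNat).Nodup := by
  have hp := pvOcc_pairwise l k
  have : ((pvOcc l k).map Int.toNat).Pairwise (· ≠ ·) := by
    rw [List.pairwise_map]
    refine List.Pairwise.imp_of_mem ?_ hp
    intro a b ha hb hlt
    rcases pvOcc_mem l k a ha with ⟨m, _, rfl, _⟩
    rcases pvOcc_mem l k b hb with ⟨m', _, rfl, _⟩
    simp at hlt ⊢
    omega
  exact this

lemma pvWfun_fst (dates : List String) (k : String) :
    ((PySem.List.enumerate (pvOcc dates k) 1).map
      (fun ri => (ri.2.toNat, pvName k ri.1))).map (·.1)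
      = (pvOcc dates k).map Int.toNat := by
  rw [List.map_map]
  have : ((fun (p : Nat × String) => p.1) ∘ (fun (ri : Int × Int) => (ri.2.toNat, pvName k ri.1)))
      = (fun (ri : Int × Int) => ri.2.toNat) := rfl
  rw [this]
  have h2 : (fun (ri : Int × Int) => ri.2.toNat)
      = (Int.toNat ∘ fun (ri : Int × Int) => ri.2) := rfl
  rw [h2, ← List.map_map, PySem.List.map_snd_enumerate]

lemma pvWrites_fst_nodup (dates : List String) :
    ((pvWrites dates).map (·.1)).Nodup := by
  unfold pvWrites
  rw [List.map_flatMap]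
  have hkeys := PySem.Set.nodup_ofList (α := String) dates
  generalize hK : PySem.Set.ofList dates = K at hkeys ⊢
  have hKmem : ∀ k ∈ K, k ∈ dates := by
    intro k hk; rw [← hK] at hk; exact (PySem.Set.mem_ofList dates k).mp hk
  clear hK
  induction K with
  | nil => simp
  | cons k K ih =>
    simp only [List.flatMap_cons]
    rw [List.nodup_append]
    rcases List.nodup_cons.mp hkeys with ⟨hkK, hK⟩
    refine ⟨?_, ih hK (fun k' hk' => hKmem k' (List.mem_cons_of_mem _ hk')), ?_⟩
    · rw [pvWfun_fst]; exact pvOcc_toNat_nodup dates k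
    · intro j hj j2 hj2
      rw [pvWfun_fst] at hj
      rcases List.mem_map.mp hj with ⟨i, hi, rfl⟩
      rcases pvOcc_mem dates k i hi with ⟨m, _, rfl, hmk⟩
      intro heq
      subst heq
      rcases List.mem_flatMap.mp hj2 with ⟨k', hk', hj'⟩
      rw [pvWfun_fst] at hj'
      rcases List.mem_map.mp hj' with ⟨i', hi', he⟩
      rcases pvOcc_mem dates k' i' hi' with ⟨m', _, rfl, hmk'⟩
      have hmm : m = m' := by simpa using he.symm
      rw [hmm, hmk'] at hmk
      have hkk : k' = k := by simpa using hmk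
      exact hkK (hkk ▸ hk')

lemma pvFoldl_scatter_flat {α : Type} (l : List α) (g : α → List (Nat × String)) :
    ∀ out, l.foldl (fun a x => pvScatter (g x) a) out = pvScatter (l.flatMap g) out := by
  induction l with
  | nil => intro out; rfl
  | cons x l ih =>
    intro out
    rw [List.foldl_cons, List.flatMap_cons]
    rw [ih]
    show pvScatter (l.flatMap g) (pvScatter (g x) out)
        = (g x ++ l.flatMap g).foldl (fun o w => o.set w.1 w.2) out
    rw [List.foldl_append]
    rfl

lemma pvAlt_eq_scatter (dates : List String) :
    rename_repeating_dates_alt dates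
      = pvScatter (pvWrites dates) (List.replicate dates.length "") := by
  show ((PySem.List.enumerate dates 0).foldl
      (fun (pd : PySem.Dict String (List Int)) p => pd.modify p.2 [] (fun l => l ++ [p.1]))
      PySem.Dict.empty).items.foldl (fun out kv =>
        (PySem.List.enumerate kv.2 1).foldl (fun out ri =>
          out.set ri.2.toNat (if ri.1 == 1 then kv.1 else kv.1 ++ "_" ++ PySem.Int.toStr ri.1)) out)
        (List.replicate dates.length "")
      = pvScatter (pvWrites dates) (List.replicate dates.length "")
  set P := (PySem.List.enumerate dates 0).foldl
      (fun (pd : PySem.Dict String (List Int)) p => pd.modify p.2 [] (fun l => l ++ [p.1]))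
      PySem.Dict.empty with hP
  have hkeys : P.keys = PySem.Set.ofList dates := by
    rw [hP]
    rw [PySem.Dict.keys_foldl_modify_key (PySem.List.enumerate dates 0)
      (fun p => p.2) [] (fun _ p => fun l => l ++ [p.1]) PySem.Dict.empty]
    rw [PySem.List.map_snd_enumerate]
    rfl
  have hnd : P.keys.Nodup := by rw [hkeys]; exact PySem.Set.nodup_ofList dates
  have hgetD : ∀ k, P.getD k [] = pvOcc dates k := by
    intro k
    have hm : P = ((PySem.List.enumerate dates 0).map (fun p => (p.2, p.1))).foldl
        (fun (d : PySem.Dict String (List Int)) p => d.modify p.1 [] (fun l => l ++ [p.2]))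
        PySem.Dict.empty := by
      rw [List.foldl_map]
    rw [hm, PySem.Dict.getD_foldl_modify_append]
    rw [List.filter_map, List.map_map]
    simp only [PySem.Dict.getD_empty, List.nil_append]
    rfl
  have hitems : P.items = P.keys.map (fun k => (k, P.getD k [])) :=
    PySem.Dict.items_eq_map_keys P hnd []
  rw [hitems, List.foldl_map, hkeys]
  have hbody : ∀ (out : List String) (k : String),
      (PySem.List.enumerate (P.getD k []) 1).foldl (fun out ri =>
        out.set ri.2.toNat (if ri.1 == 1 then k else k ++ "_" ++ PySem.Int.toStr ri.1)) out
      = pvScatter ((PySem.List.enumerate (pvOcc dates k) 1).map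
          (fun ri => (ri.2.toNat, pvName k ri.1))) out := by
    intro out k
    rw [hgetD k]
    show _ = ((PySem.List.enumerate (pvOcc dates k) 1).map
        (fun ri => (ri.2.toNat, pvName k ri.1))).foldl (fun o w => o.set w.1 w.2) out
    rw [List.foldl_map]
    rfl
  calc (PySem.Set.ofList dates).foldl (fun out k =>
        (PySem.List.enumerate (P.getD k []) 1).foldl (fun out ri =>
          out.set ri.2.toNat (if ri.1 == 1 then k else k ++ "_" ++ PySem.Int.toStr ri.1)) out)
        (List.replicate dates.length "")
      = (PySem.Set.ofList dates).foldl (fun out k =>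
          pvScatter ((PySem.List.enumerate (pvOcc dates k) 1).map
            (fun ri => (ri.2.toNat, pvName k ri.1))) out) (List.replicate dates.length "") := by
        exact PySem.List.foldl_congr_mem _ _ _ _ (fun out k _ => hbody out k)
    _ = pvScatter (pvWrites dates) (List.replicate dates.length "") := by
        rw [pvFoldl_scatter_flat]; rfl

lemma pvSpecList_length (l : List String) : ∀ p, (pvSpecList p l).length = l.length := by
  induction l with
  | nil => intro p; rfl
  | cons d l ih => intro p; simp [pvSpecList, ih]

lemma pvSpecList_getElem? (l : List String) : ∀ (p : List String) (j : Nat) (k : String),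
    l[j]? = some k →
    (pvSpecList p l)[j]? = some (pvRender k ((p ++ l.take (j+1)).count k)) := by
  induction l with
  | nil => intro p j k h; simp at h
  | cons d l ih =>
    intro p j k h
    cases j with
    | zero =>
      simp at h
      subst h
      simp [pvSpecList]
    | succ j =>
      simp only [List.getElem?_cons_succ] at h
      show (pvSpecList (p ++ [d]) l)[j]? = _
      rw [ih (p ++ [d]) j k h]
      congr 2
      simp

lemma pvB_eq_spec (dates : List String) :
    rename_repeating_dates_alt dates = pvSpecList [] dates := by
  rw [pvAlt_eq_scatter]
  apply List.ext_getElem?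
  intro j
  rcases Nat.lt_or_ge j dates.length with hj | hj
  · have hk : dates[j]? = some dates[j] := List.getElem?_eq_getElem hj
    set k := dates[j] with hkdef
    set c := (dates.take (j+1)).count k with hc
    have hocc := pvOcc_getElem? dates k j hk
    have hwmem : (j, pvName k (c : Int)) ∈ pvWrites dates := by
      unfold pvWrites
      rw [List.mem_flatMap]
      refine ⟨k, (PySem.Set.mem_ofList dates k).mpr (List.getElem_mem hj), ?_⟩
      rw [List.mem_map]
      have hlt : c - 1 < (pvOcc dates k).length := (List.getElem?_eq_some_iff.mp hocc).1
      have hc1 : 1 ≤ c := by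
        rw [hc]
        refine List.count_pos_iff.mpr ?_
        have : (dates.take (j+1))[j]? = some k := by
          rw [List.getElem?_take_of_lt (Nat.lt_succ_self j)]
          exact hk
        exact List.mem_of_getElem? this
      refine ⟨((1 : Int) + (c - 1 : Nat), (j : Int)), ?_, ?_⟩
      · rw [PySem.List.mem_enumerate_iff]
        refine ⟨c - 1, hlt, ?_⟩
        have h2 := (List.getElem?_eq_some_iff.mp hocc).2
        refine Prod.ext rfl ?_
        simpa using h2.symm
      · have h1 : ((1 : Int) + (c - 1 : Nat)) = (c : Int) := by omega
        rw [h1]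
        simp
    rw [pvScatter_getElem?_of_mem (pvWrites dates) _ j (pvName k (c : Int))
      (pvWrites_fst_nodup dates) hwmem (by simp [hj])]
    rw [pvSpecList_getElem? dates [] j k hk]
    rw [pvName_cast]
    simp [hc]
  · rw [List.getElem?_eq_none, List.getElem?_eq_none]
    · rw [pvSpecList_length]; exact hj
    · rw [pvScatter_length]; simp [hj]

-- ===== VERDICT (by name: the statement is the Claim_ definition above) =====
theorem rename_repeating_dates_spec : Claim_equal_rename_repeating_dates := by
  intro dates _
  show rename_repeating_dates dates = rename_repeating_dates_alt dates
  have ha : rename_repeating_dates dates = pvSpecList [] dates := by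
    show (dates.foldl pvStepFun (PySem.Dict.counter [], [])).2 = pvSpecList [] dates
    simpa using pvA_fold dates [] []
  have hb : rename_repeating_dates_alt dates = pvSpecList [] dates := pvB_eq_spec dates
  rw [ha, hb]
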